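-- pv_equiv track=rewrite | github.com/Hmarkey/AIDNS | DataProc.py | ProcessIP
-- ===== SOURCE A (Python) =====
-- def ProcessIP(ipstr):
--     res = []
--     ips = ipstr.split(',')
--     for ip in ips:
--         if ip[0] == " ":
--             ip = ip[2:-1]
--         else:
--             ip = ip[1:-1]
--         value = 0
--         try:
--             for j, i in enumerate(ip.split('.')[::-1]):
--                 value += 256 ** j * int(i)
--             res.append(value)
--         except ValueError:
--             continue
--     return res
-- ===== SOURCE B (Python) =====
-- def ProcessIP(ipstr):
--     res = []
--     for ip in ipstr.split(','):
--         ip = ip[2:-1] if ip[0] == " " else ip[1:-1]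
--         try:
--             value = 0
--             for octet in ip.split('.'):
--                 value = value * 256 + int(octet)
--         except ValueError:
--             continue
--         res.append(value)
--     return res
-- ===== Notes on version B (the rewrite author's own statement) =====
-- stated objective: simpler
-- what changed: A computes each address by reversing the octet list and summing 256**j * int(octet) via enumerate; B uses a forward Horner fold (value = value*256 + int(octet)) in a small parse helper and collects results by appending only on success, with no reversal, enumerate or exponentiation.
import Mathlib
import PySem

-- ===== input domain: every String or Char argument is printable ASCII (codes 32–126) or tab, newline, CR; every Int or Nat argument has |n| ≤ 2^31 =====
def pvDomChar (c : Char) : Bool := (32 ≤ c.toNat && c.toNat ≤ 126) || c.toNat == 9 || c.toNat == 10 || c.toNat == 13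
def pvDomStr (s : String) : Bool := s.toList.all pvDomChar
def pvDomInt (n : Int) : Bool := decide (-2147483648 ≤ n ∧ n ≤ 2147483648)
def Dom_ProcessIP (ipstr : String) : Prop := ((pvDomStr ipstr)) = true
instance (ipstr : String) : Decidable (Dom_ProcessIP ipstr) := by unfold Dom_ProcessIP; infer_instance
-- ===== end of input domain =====

-- B replaces A's reversed-enumerate power sum (256**j * int(i)) by a forward Horner fold
-- value = value*256 + int(octet) in a per-segment parse helper: simpler, no reversal or powers.

-- ===== PORT A =====
-- literal transliteration of A; ip.split('.')[::-1] ported as .reverse (PySem.List.slice?_none_none_neg_one)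
def ProcessIP (ipstr : String) : List Int :=
  (PySem.Chars.splitOn ipstr.toList [',']).foldl
    (fun res ip =>
      match (PySem.List.enumerate ((PySem.Chars.splitOn
              (if PySem.List.pyGet? ip 0 = some ' '
               then PySem.List.slice ip (some 2) (some (-1))
               else PySem.List.slice ip (some 1) (some (-1))) ['.']).reverse)).foldl
          (fun acc ji => acc.bind (fun v =>
            (PySem.Int.ofChars? ji.2).map (fun n => v + 256 ^ ji.1.toNat * n)))
          (some 0) with
      | some v => res ++ [v]
      | none => res) []

-- ===== PORT B =====
-- B's helper _v: forward Horner over the octets; none = the ValueError caught in B's try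
def pvParse (ip : List Char) : Option Int :=
  (PySem.Chars.splitOn ip ['.']).foldl
    (fun acc oct => acc.bind (fun v =>
      (PySem.Int.ofChars? oct).map (fun n => v * 256 + n)))
    (some 0)

def ProcessIP_alt (ipstr : String) : List Int :=
  (PySem.Chars.splitOn ipstr.toList [',']).filterMap (fun ip =>
    pvParse (if PySem.List.pyGet? ip 0 = some ' '
             then PySem.List.slice ip (some 2) (some (-1))
             else PySem.List.slice ip (some 1) (some (-1))))

-- ===== PRECONDITION & SPEC =====
-- A raises IndexError (ip[0]) on any empty comma-segment (e.g. "" or "a,,b"); Pre_ excludes exactly those inputs.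
def Pre_ProcessIP (ipstr : String) : Prop :=
  ∀ seg ∈ PySem.Chars.splitOn ipstr.toList [','], seg ≠ []
instance (ipstr : String) : Decidable (Pre_ProcessIP ipstr) := by unfold Pre_ProcessIP; infer_instance

def pvWitness_ProcessIP : String := "'1.2.3.4', '5.6.7.8'"

def Spec_ProcessIP (ipstr : String) (out : List Int) : Prop := out = ProcessIP_alt ipstr
instance (ipstr : String) (out : List Int) : Decidable (Spec_ProcessIP ipstr out) := by unfold Spec_ProcessIP; infer_instance

-- ===== CLAIM (what is proved, stated in full; the proofs are below) =====
def Claim_equal_ProcessIP : Prop := ∀ (ipstr : String), Dom_ProcessIP ipstr → Pre_ProcessIP ipstr → Spec_ProcessIP ipstr (ProcessIP ipstr)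

-- ===== LEMMAS AND PROOFS =====

-- the octet fold propagates a failed accumulator
theorem pv_foldl_bind_none {α : Type} (l : List α) (g : α → Int → Option Int) :
    l.foldl (fun acc x => acc.bind (fun v => g x v)) none = none := by
  induction l with
  | nil => rfl
  | cons x l ih => simpa using ih

-- shifting the Horner accumulator out of the fold
theorem pv_horner_shift (ps : List (List Char)) (v : Int) :
    ps.foldl (fun acc oct => acc.bind (fun v =>
        (PySem.Int.ofChars? oct).map (fun n => v * 256 + n))) (some v)
    = (ps.foldl (fun acc oct => acc.bind (fun v =>
        (PySem.Int.ofChars? oct).map (fun n => v * 256 + n))) (some 0)).map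
        (fun w => v * 256 ^ ps.length + w) := by
  induction ps generalizing v with
  | nil => simp
  | cons p ps ih =>
    cases h : PySem.Int.ofChars? p with
    | none => simp [h, pv_foldl_bind_none]
    | some n =>
      simp only [List.foldl_cons, h, Option.map_some, Option.bind_some]
      rw [ih (v * 256 + n), ih (0 * 256 + n)]
      cases ps.foldl (fun acc oct => acc.bind (fun v =>
          (PySem.Int.ofChars? oct).map (fun n => v * 256 + n))) (some 0) with
      | none => rfl
      | some w =>
        simp only [Option.map_some, Option.some.injEq, List.length_cons]
        push_cast
        ring

theorem pv_enumerate_append {α : Type} (xs : List α) (x : α) (s : Int) :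
    PySem.List.enumerate (xs ++ [x]) s
      = PySem.List.enumerate xs s ++ [((s + xs.length : Int), x)] := by
  induction xs generalizing s with
  | nil => simp [PySem.List.enumerate_cons, PySem.List.enumerate_nil]
  | cons y ys ih =>
    simp only [List.cons_append, PySem.List.enumerate_cons, ih]
    have hidx : s + 1 + (ys.length : Int) = s + ((y :: ys).length : Int) := by
      simp only [List.length_cons]; push_cast; ring
    rw [hidx]

-- A's reversed power sum equals B's forward Horner
theorem pv_powsum_eq_horner (ps : List (List Char)) :
    (PySem.List.enumerate ps.reverse).foldl
        (fun acc ji => acc.bind (fun v =>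
          (PySem.Int.ofChars? ji.2).map (fun n => v + 256 ^ ji.1.toNat * n)))
        (some 0)
    = ps.foldl (fun acc oct => acc.bind (fun v =>
          (PySem.Int.ofChars? oct).map (fun n => v * 256 + n))) (some 0) := by
  induction ps with
  | nil => rfl
  | cons p ps ih =>
    rw [List.reverse_cons, pv_enumerate_append, List.foldl_append, ih]
    simp only [List.foldl_cons, List.foldl_nil, List.length_reverse, Option.bind_some,
      zero_add, Int.toNat_natCast]
    cases h : PySem.Int.ofChars? p with
    | none =>
      cases hF : ps.foldl (fun acc oct => acc.bind (fun v =>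
          (PySem.Int.ofChars? oct).map (fun n => v * 256 + n))) (some 0) <;>
        simp [pv_foldl_bind_none]
    | some n =>
      simp only [Option.map_some]
      rw [pv_horner_shift ps (0 * 256 + n)]
      cases hF : ps.foldl (fun acc oct => acc.bind (fun v =>
          (PySem.Int.ofChars? oct).map (fun n => v * 256 + n))) (some 0) with
      | none => simp
      | some w =>
        simp only [Option.map_some, Option.bind_some, Option.some.injEq]
        ring

-- A's append-or-skip fold over the segments is a filterMap
theorem pv_foldl_match_eq_filterMap {α : Type} (l : List α) (f : α → Option Int)
    (init : List Int) :
    l.foldl (fun res ip => match f ip with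
      | some v => res ++ [v]
      | none => res) init = init ++ l.filterMap f := by
  induction l generalizing init with
  | nil => simp
  | cons x l ih =>
    simp only [List.foldl_cons, List.filterMap_cons]
    cases f x <;> simp [ih]

-- ===== VERDICT (by name: the statement is the Claim_ definition above) =====
theorem ProcessIP_spec : Claim_equal_ProcessIP := by
  intro ipstr _ _
  unfold Spec_ProcessIP ProcessIP ProcessIP_alt
  rw [pv_foldl_match_eq_filterMap]
  simp only [List.nil_append]
  apply List.filterMap_congr
  intro ip _
  rw [pv_powsum_eq_horner]
  rfl
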